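-- pv_equiv track=rewrite | github.com/sirzzang/coding-practice | week04_피로도.py | solution
-- ===== SOURCE A (Python) =====
-- from functools import reduce
-- from functools import reduce
--
-- def solution(k, dungeons):
--     # 전체 다 탐험할 수 있는 경우
--     max_k = reduce(lambda acc, cur: acc + cur[1], dungeons, 0)
--     if max_k <= k:
--         return len(dungeons)
--
--     answer = 0
--     while k and dungeons:
--         # 탐험을 위해 필요한 최소 피로도가 현재 피로도 이하인 던전
--         candidates = [dungeon for dungeon in dungeons if dungeon[0] <= k]
--         if not candidates:
--             return answer
--
--         candidates.sort(key=lambda x: x[1])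
--         visited = candidates[0]
--         k -= visited[1]
--         answer += 1
--         dungeons.remove(visited)
--
--     return answer
-- ===== SOURCE B (Python) =====
-- def solution(k, dungeons):
--     # every dungeon can be explored outright
--     if sum(c for _, c in dungeons) <= k:
--         return len(dungeons)
--     return explore(k, sorted(dungeons, key=lambda d: d[1]))
--
--
-- def explore(k, pool):
--     # pool is sorted by consumption once; the first affordable dungeon in it is
--     # the min-consumption affordable one, so take it, drop it by position, recurse.
--     if k == 0:
--         return 0
--     for i, (req, cost) in enumerate(pool):
--         if req <= k:
--             return 1 + explore(k - cost, pool[:i] + pool[i + 1:])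
--     return 0
-- ===== Notes on version B (the rewrite author's own statement) =====
-- stated objective: alternative
-- what changed: A re-filters the pool and stable-sorts the affordable candidates on every round and removes the pick by value; B sorts the pool by consumption ONCE up front and then recursively takes the first affordable dungeon of the sorted pool (which is exactly the min-consumption affordable one) and drops it by position, so the per-round sort disappears.
import Mathlib
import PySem

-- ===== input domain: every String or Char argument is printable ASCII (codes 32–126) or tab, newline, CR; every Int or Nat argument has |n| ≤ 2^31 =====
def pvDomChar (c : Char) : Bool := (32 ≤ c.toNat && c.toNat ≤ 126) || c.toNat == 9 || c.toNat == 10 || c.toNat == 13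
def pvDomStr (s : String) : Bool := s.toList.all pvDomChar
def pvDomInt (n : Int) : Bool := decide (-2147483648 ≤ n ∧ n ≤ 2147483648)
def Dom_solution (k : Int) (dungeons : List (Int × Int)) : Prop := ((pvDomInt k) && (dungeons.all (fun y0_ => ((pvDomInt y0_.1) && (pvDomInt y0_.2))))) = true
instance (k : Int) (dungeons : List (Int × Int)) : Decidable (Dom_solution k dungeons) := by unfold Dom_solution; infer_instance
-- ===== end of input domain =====

-- B sorts the pool by consumption once and then recursively takes the first affordable dungeon of
-- the sorted pool, so A's per-round filter+sort disappears (objective: alternative). A mutates its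
-- `dungeons` argument in place (list.remove); B does not — the equivalence proved here is about the
-- RETURN value only.

-- ===== PORT A =====
-- the while-loop; fuel = current pool length bounds the iterations (each one removes an element)
def solLoopA : Nat → Int → List (Int × Int) → Int → Int
  | 0, _, _, answer => answer
  | fuel + 1, k, dungeons, answer =>
    if k ≠ 0 ∧ dungeons ≠ [] then
      let candidates := dungeons.filter (fun d => decide (d.1 ≤ k))
      if candidates = [] then answer
      else
        match PySem.List.sorted candidates (fun x => x.2) false with
        | [] => answer   -- unreachable: candidates ≠ []
        | visited :: _ =>
          -- dungeons.remove(visited); visited ∈ dungeons, so remove? never fails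
          solLoopA fuel (k - visited.2) ((PySem.List.remove? dungeons visited).getD []) (answer + 1)
    else answer

def solution (k : Int) (dungeons : List (Int × Int)) : Int :=
  let max_k := dungeons.foldl (fun acc cur => acc + cur.2) 0
  if max_k ≤ k then (dungeons.length : Int)
  else solLoopA dungeons.length k dungeons 0

-- ===== PORT B =====
-- the for-loop of `explore`: first element satisfying p together with the rest (pool[:i]+pool[i+1:])
def splitFirst (p : Int × Int → Bool) : List (Int × Int) → Option ((Int × Int) × List (Int × Int))
  | [] => none
  | x :: xs => if p x then some (x, xs) else (splitFirst p xs).map (fun r => (r.1, x :: r.2))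

-- needed by `explore`'s termination proof
theorem splitFirst_length (p : Int × Int → Bool) (l : List (Int × Int))
    (r : (Int × Int) × List (Int × Int)) (h : splitFirst p l = some r) :
    r.2.length + 1 = l.length := by
  induction l generalizing r with
  | nil => simp [splitFirst] at h
  | cons x xs ih =>
    by_cases hx : p x
    · rw [show splitFirst p (x :: xs) = some (x, xs) by simp [splitFirst, hx]] at h
      injection h with h
      subst h; simp
    · rw [show splitFirst p (x :: xs) = (splitFirst p xs).map (fun r => (r.1, x :: r.2))
          by simp [splitFirst, hx]] at h
      obtain ⟨r', hr', rfl⟩ := Option.map_eq_some_iff.mp h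
      have := ih r' hr'
      simp [← this]

def explore (k : Int) (pool : List (Int × Int)) : Int :=
  if k = 0 then 0
  else
    match h : splitFirst (fun d => decide (d.1 ≤ k)) pool with
    | none => 0
    | some r => 1 + explore (k - r.1.2) r.2
termination_by pool.length
decreasing_by have := splitFirst_length _ _ _ h; omega

def solution_alt (k : Int) (dungeons : List (Int × Int)) : Int :=
  if dungeons.foldl (fun acc cur => acc + cur.2) 0 ≤ k then (dungeons.length : Int)
  else explore k (PySem.List.sorted dungeons (fun d => d.2) false)

-- ===== PRECONDITION & SPEC =====
def Spec_solution (k : Int) (dungeons : List (Int × Int)) (out : Int) : Prop := out = solution_alt k dungeons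
instance (k : Int) (dungeons : List (Int × Int)) (out : Int) : Decidable (Spec_solution k dungeons out) := by unfold Spec_solution; infer_instance

-- ===== CLAIM (what is proved, stated in full; the proofs are below) =====
def Claim_equal_solution : Prop := ∀ (k : Int) (dungeons : List (Int × Int)), Dom_solution k dungeons → Spec_solution k dungeons (solution k dungeons)

-- ===== LEMMAS AND PROOFS =====

-- drop the first element satisfying p
def popFirst (p : Int × Int → Bool) : List (Int × Int) → List (Int × Int)
  | [] => []
  | x :: xs => if p x then xs else x :: popFirst p xs

theorem splitFirst_eq (p : Int × Int → Bool) (l : List (Int × Int)) :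
    splitFirst p l = (l.find? p).map (fun v => (v, popFirst p l)) := by
  induction l with
  | nil => rfl
  | cons x xs ih =>
    by_cases hx : p x
    · rw [List.find?_cons_of_pos hx]
      simp [splitFirst, popFirst, hx]
    · rw [List.find?_cons_of_neg hx]
      rw [show splitFirst p (x :: xs) = (splitFirst p xs).map (fun r => (r.1, x :: r.2))
          by simp [splitFirst, hx], ih]
      cases xs.find? p <;> simp [popFirst, hx]

theorem find?_eq_head?_filter (p : Int × Int → Bool) (l : List (Int × Int)) :
    l.find? p = (l.filter p).head? := by
  induction l with
  | nil => rfl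
  | cons x xs ih =>
    by_cases hx : p x
    · rw [List.find?_cons_of_pos hx, List.filter_cons, if_pos hx]
      rfl
    · rw [List.find?_cons_of_neg hx, List.filter_cons, if_neg (by simpa using hx), ih]

theorem remove?_eq_popFirst (p : Int × Int → Bool) (xs : List (Int × Int)) (v : Int × Int)
    (h : xs.find? p = some v) : PySem.List.remove? xs v = some (popFirst p xs) := by
  induction xs with
  | nil => simp at h
  | cons x t ih =>
    by_cases hp : p x
    · have hv : x = v := by
        rw [List.find?_cons_of_pos hp] at h; exact Option.some.inj h
      subst hv
      rw [PySem.List.remove?_cons_self]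
      simp [popFirst, hp]
    · rw [List.find?_cons_of_neg hp] at h
      have hpv : p v = true := List.find?_some h
      have hne : x ≠ v := by rintro rfl; exact hp hpv
      rw [PySem.List.remove?_cons_of_ne t hne, ih h]
      simp [popFirst, hp]

-- insertBy at the head when everything compares greater
theorem insertBy_eq_cons (cmp : Int × Int → Int × Int → Bool) (x : Int × Int)
    (l : List (Int × Int)) (h : ∀ z ∈ l, cmp x z = true) :
    PySem.List.insertBy cmp x l = x :: l := by
  cases l with
  | nil => rfl
  | cons y ys => simp [PySem.List.insertBy, h y (List.mem_cons_self)]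

-- filter commutes with insertion into a key-sorted list
theorem filter_insertBy_pos (p : Int × Int → Bool) (x : Int × Int) (S : List (Int × Int))
    (hx : p x = true) (hS : S.Pairwise (fun a b => a.2 ≤ b.2)) :
    (PySem.List.insertBy (fun a b => decide (a.2 < b.2)) x S).filter p
      = PySem.List.insertBy (fun a b => decide (a.2 < b.2)) x (S.filter p) := by
  induction S with
  | nil => simp [PySem.List.insertBy, hx]
  | cons y ys ih =>
    rw [List.pairwise_cons] at hS
    by_cases hcmp : (decide (x.2 < y.2) : Bool)
    · rw [show PySem.List.insertBy (fun a b => decide (a.2 < b.2)) x (y :: ys)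
            = x :: y :: ys by simp [PySem.List.insertBy, hcmp]]
      rw [List.filter_cons, if_pos hx]
      by_cases hpy : p y
      · rw [List.filter_cons, if_pos hpy]
        simp [PySem.List.insertBy, hcmp]
      · rw [List.filter_cons, if_neg (by simpa using hpy)]
        rw [insertBy_eq_cons]
        intro z hz
        have hzy := hS.1 z (List.mem_of_mem_filter hz)
        have hxy : x.2 < y.2 := by simpa using hcmp
        simp
        omega
    · rw [show PySem.List.insertBy (fun a b => decide (a.2 < b.2)) x (y :: ys)
            = y :: PySem.List.insertBy (fun a b => decide (a.2 < b.2)) x ys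
          by simp [PySem.List.insertBy, hcmp]]
      by_cases hpy : p y
      · rw [List.filter_cons, if_pos hpy, List.filter_cons, if_pos hpy, ih hS.2]
        simp [PySem.List.insertBy, hcmp]
      · rw [List.filter_cons, if_neg (by simpa using hpy), List.filter_cons,
          if_neg (by simpa using hpy), ih hS.2]

theorem filter_insertBy_neg (p : Int × Int → Bool) (x : Int × Int) (S : List (Int × Int))
    (hx : p x = false) :
    (PySem.List.insertBy (fun a b => decide (a.2 < b.2)) x S).filter p = S.filter p := by
  induction S with
  | nil => simp [PySem.List.insertBy, hx]
  | cons y ys ih =>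
    by_cases hcmp : (decide (x.2 < y.2) : Bool)
    · rw [show PySem.List.insertBy (fun a b => decide (a.2 < b.2)) x (y :: ys)
            = x :: y :: ys by simp [PySem.List.insertBy, hcmp]]
      rw [List.filter_cons, if_neg (by simpa using hx)]
    · rw [show PySem.List.insertBy (fun a b => decide (a.2 < b.2)) x (y :: ys)
            = y :: PySem.List.insertBy (fun a b => decide (a.2 < b.2)) x ys
          by simp [PySem.List.insertBy, hcmp]]
      rw [List.filter_cons, List.filter_cons, ih]

theorem sorted_snoc (l : List (Int × Int)) (x : Int × Int) :
    PySem.List.sorted (l ++ [x]) (fun d => d.2) false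
      = PySem.List.insertBy (fun a b => decide (a.2 < b.2)) x
          (PySem.List.sorted l (fun d => d.2) false) := by
  rw [PySem.List.sorted_eq_foldl_insertBy, PySem.List.sorted_eq_foldl_insertBy, List.foldl_append]
  rfl

-- stable sort commutes with filter
theorem sorted_filter (p : Int × Int → Bool) (l : List (Int × Int)) :
    PySem.List.sorted (l.filter p) (fun d => d.2) false
      = (PySem.List.sorted l (fun d => d.2) false).filter p := by
  induction l using List.reverseRecOn with
  | nil => rfl
  | append_singleton l x ih =>
    rw [List.filter_append, sorted_snoc]
    by_cases hx : p x
    · rw [show List.filter p [x] = [x] by simp [hx], sorted_snoc, ih,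
        filter_insertBy_pos p x _ hx (PySem.List.sorted_pairwise l (fun d => d.2))]
    · rw [show List.filter p [x] = [] by simp [hx], List.append_nil, ih,
        filter_insertBy_neg p x _ (by simpa using hx)]

-- removing a value commutes with insertion into a key-sorted list
theorem remove?_insertBy_mem (x v : Int × Int) (S : List (Int × Int))
    (hS : S.Pairwise (fun a b => a.2 ≤ b.2)) (hv : v ∈ S) :
    PySem.List.remove? (PySem.List.insertBy (fun a b => decide (a.2 < b.2)) x S) v
      = (PySem.List.remove? S v).map (PySem.List.insertBy (fun a b => decide (a.2 < b.2)) x) := by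
  induction S with
  | nil => simp at hv
  | cons y ys ih =>
    rw [List.pairwise_cons] at hS
    by_cases hcmp : (decide (x.2 < y.2) : Bool)
    · rw [show PySem.List.insertBy (fun a b => decide (a.2 < b.2)) x (y :: ys)
            = x :: y :: ys by simp [PySem.List.insertBy, hcmp]]
      have hxv : x ≠ v := by
        rintro rfl
        simp at hcmp
        rcases List.mem_cons.mp hv with rfl | hmem
        · omega
        · have := hS.1 x hmem; omega
      rw [PySem.List.remove?_cons_of_ne _ hxv]
      by_cases hyv : y = v
      · subst hyv
        have hall : ∀ z ∈ ys, (fun a b : Int × Int => decide (a.2 < b.2)) x z = true := by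
          intro z hz
          have h1 := hS.1 z hz
          have h2 : x.2 < y.2 := by simpa using hcmp
          simp
          omega
        rw [PySem.List.remove?_cons_self y ys]
        simp only [Option.map_some]
        rw [insertBy_eq_cons (fun a b => decide (a.2 < b.2)) x ys hall]
      · have hvys : v ∈ ys := by
          rcases List.mem_cons.mp hv with h | h; exact absurd h.symm hyv; exact h
        rw [PySem.List.remove?_cons_of_ne _ hyv]
        obtain ⟨t, ht⟩ : ∃ t, PySem.List.remove? ys v = some t := by
          rw [PySem.List.remove?_eq_some_erase _ _ hvys]; exact ⟨_, rfl⟩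
        rw [ht]
        simp [show PySem.List.insertBy (fun a b => decide (a.2 < b.2)) x (y :: t)
            = x :: y :: t by simp [PySem.List.insertBy, hcmp]]
    · rw [show PySem.List.insertBy (fun a b => decide (a.2 < b.2)) x (y :: ys)
            = y :: PySem.List.insertBy (fun a b => decide (a.2 < b.2)) x ys
          by simp [PySem.List.insertBy, hcmp]]
      by_cases hyv : y = v
      · subst hyv
        rw [PySem.List.remove?_cons_self y
            (PySem.List.insertBy (fun a b => decide (a.2 < b.2)) x ys),
          PySem.List.remove?_cons_self y ys]
        rfl
      · have hvys : v ∈ ys := by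
          rcases List.mem_cons.mp hv with h | h; exact absurd h.symm hyv; exact h
        rw [PySem.List.remove?_cons_of_ne _ hyv, PySem.List.remove?_cons_of_ne _ hyv,
          ih hS.2 hvys]
        obtain ⟨t, ht⟩ : ∃ t, PySem.List.remove? ys v = some t := by
          rw [PySem.List.remove?_eq_some_erase _ _ hvys]; exact ⟨_, rfl⟩
        rw [ht]
        simp [show PySem.List.insertBy (fun a b => decide (a.2 < b.2)) x (y :: t)
            = y :: PySem.List.insertBy (fun a b => decide (a.2 < b.2)) x t
          by simp [PySem.List.insertBy, hcmp]]

theorem remove?_insertBy_self (x : Int × Int) (S : List (Int × Int)) (hv : x ∉ S) :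
    PySem.List.remove? (PySem.List.insertBy (fun a b => decide (a.2 < b.2)) x S) x = some S := by
  induction S with
  | nil => simp [PySem.List.insertBy]
  | cons y ys ih =>
    have hyx : y ≠ x := fun h => hv (h ▸ List.mem_cons_self)
    by_cases hcmp : (decide (x.2 < y.2) : Bool)
    · rw [show PySem.List.insertBy (fun a b => decide (a.2 < b.2)) x (y :: ys)
            = x :: y :: ys by simp [PySem.List.insertBy, hcmp]]
      exact PySem.List.remove?_cons_self _ _
    · rw [show PySem.List.insertBy (fun a b => decide (a.2 < b.2)) x (y :: ys)
            = y :: PySem.List.insertBy (fun a b => decide (a.2 < b.2)) x ys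
          by simp [PySem.List.insertBy, hcmp]]
      rw [PySem.List.remove?_cons_of_ne _ hyx, ih (fun h => hv (List.mem_cons_of_mem _ h))]
      rfl

theorem remove?_append_left (l m : List (Int × Int)) (v : Int × Int) (hv : v ∈ l) :
    PySem.List.remove? (l ++ m) v = (PySem.List.remove? l v).map (· ++ m) := by
  induction l with
  | nil => simp at hv
  | cons y ys ih =>
    by_cases hyv : y = v
    · subst hyv
      rw [List.cons_append, PySem.List.remove?_cons_self y (ys ++ m),
        PySem.List.remove?_cons_self y ys]
      rfl
    · have hvys : v ∈ ys := by rcases List.mem_cons.mp hv with h | h; exact absurd h.symm hyv; exact h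
      rw [List.cons_append, PySem.List.remove?_cons_of_ne _ hyv,
        PySem.List.remove?_cons_of_ne _ hyv, ih hvys]
      obtain ⟨t, ht⟩ : ∃ t, PySem.List.remove? ys v = some t := by
        rw [PySem.List.remove?_eq_some_erase _ _ hvys]; exact ⟨_, rfl⟩
      rw [ht]; rfl

theorem remove?_append_singleton_self (l : List (Int × Int)) (v : Int × Int) (hv : v ∉ l) :
    PySem.List.remove? (l ++ [v]) v = some l := by
  induction l with
  | nil => simp
  | cons y ys ih =>
    have hyv : y ≠ v := fun h => hv (h ▸ List.mem_cons_self)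
    rw [List.cons_append, PySem.List.remove?_cons_of_ne _ hyv,
      ih (fun h => hv (List.mem_cons_of_mem _ h))]
    rfl

-- stable sort commutes with removing the first occurrence of a value
theorem sorted_remove (l : List (Int × Int)) (v : Int × Int) (hv : v ∈ l) :
    PySem.List.remove? (PySem.List.sorted l (fun d => d.2) false) v
      = (PySem.List.remove? l v).map (fun t => PySem.List.sorted t (fun d => d.2) false) := by
  induction l using List.reverseRecOn with
  | nil => simp at hv
  | append_singleton l x ih =>
    rw [sorted_snoc]
    by_cases hvl : v ∈ l
    · rw [remove?_insertBy_mem x v _ (PySem.List.sorted_pairwise l (fun d => d.2))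
        ((PySem.List.mem_sorted _ _ _ _).mpr hvl), ih hvl,
        remove?_append_left l [x] v hvl]
      obtain ⟨t, ht⟩ : ∃ t, PySem.List.remove? l v = some t := by
        rw [PySem.List.remove?_eq_some_erase _ _ hvl]; exact ⟨_, rfl⟩
      rw [ht]
      simp [sorted_snoc]
    · have hvx : v = x := by
        rcases List.mem_append.mp hv with h | h
        · exact absurd h hvl
        · simpa using h
      subst hvx
      rw [remove?_insertBy_self v _ (fun h => hvl ((PySem.List.mem_sorted _ _ _ _).mp h)),
        remove?_append_singleton_self l v hvl]
      rfl

-- the main loop equivalence: A's loop over the raw pool = B's recursion over the sorted pool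
-- evaluation rules for `explore`
theorem explore_none (k : Int) (pool : List (Int × Int)) (hk : ¬ k = 0)
    (h : splitFirst (fun d => decide (d.1 ≤ k)) pool = none) : explore k pool = 0 := by
  rw [explore, if_neg hk]
  split
  · rfl
  · next r heq => rw [h] at heq; cases heq

theorem explore_some (k : Int) (pool : List (Int × Int)) (r : (Int × Int) × List (Int × Int))
    (hk : ¬ k = 0) (h : splitFirst (fun d => decide (d.1 ≤ k)) pool = some r) :
    explore k pool = 1 + explore (k - r.1.2) r.2 := by
  rw [explore, if_neg hk]
  split
  · next heq => rw [h] at heq; cases heq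
  · next r' heq =>
    rw [h] at heq
    injection heq with heq
    subst heq
    rfl

theorem loopA_eq_explore (fuel : Nat) (k : Int) (pool : List (Int × Int)) (ans : Int)
    (hf : pool.length ≤ fuel) :
    solLoopA fuel k pool ans = ans + explore k (PySem.List.sorted pool (fun d => d.2) false) := by
  induction fuel generalizing k pool ans with
  | zero =>
    have : pool = [] := List.eq_nil_of_length_eq_zero (Nat.le_zero.mp hf)
    subst this
    rw [solLoopA]
    by_cases hk : k = 0
    · rw [explore, if_pos hk]; simp
    · rw [explore_none k _ hk rfl]; simp
  | succ fuel ih =>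
    rw [solLoopA]
    by_cases hg : k ≠ 0 ∧ pool ≠ []
    · rw [if_pos hg]
      by_cases hc : pool.filter (fun d => decide (d.1 ≤ k)) = []
      · have hfs : (PySem.List.sorted pool (fun d => d.2) false).filter
            (fun d => decide (d.1 ≤ k)) = [] := by
          rw [← sorted_filter, hc]; rfl
        have hfind : (PySem.List.sorted pool (fun d => d.2) false).find?
            (fun d => decide (d.1 ≤ k)) = none := by
          rw [find?_eq_head?_filter, hfs]; rfl
        have hsf : splitFirst (fun d => decide (d.1 ≤ k))
            (PySem.List.sorted pool (fun d => d.2) false) = none := by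
          rw [splitFirst_eq, hfind]; rfl
        rw [explore_none _ _ hg.1 hsf]
        simp [hc]
      · have hsne : PySem.List.sorted (pool.filter (fun d => decide (d.1 ≤ k)))
            (fun x => x.2) false ≠ [] := by
          rw [Ne, PySem.List.sorted_eq_nil_iff]; exact hc
        obtain ⟨v, t, hs⟩ := List.exists_cons_of_ne_nil hsne
        have hvmemf : v ∈ pool.filter (fun d => decide (d.1 ≤ k)) := by
          have : v ∈ PySem.List.sorted (pool.filter (fun d => decide (d.1 ≤ k)))
              (fun x => x.2) false := by rw [hs]; exact List.mem_cons_self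
          exact (PySem.List.mem_sorted _ _ _ _).mp this
        have hvpool : v ∈ pool := List.mem_of_mem_filter hvmemf
        -- B side: find? on the sorted pool returns v
        have hfind : (PySem.List.sorted pool (fun d => d.2) false).find?
            (fun d => decide (d.1 ≤ k)) = some v := by
          rw [find?_eq_head?_filter, ← sorted_filter, hs]; rfl
        obtain ⟨t0, ht0⟩ : ∃ t0, PySem.List.remove? pool v = some t0 := by
          rw [PySem.List.remove?_eq_some_erase _ _ hvpool]; exact ⟨_, rfl⟩
        have hpop : popFirst (fun d => decide (d.1 ≤ k))
            (PySem.List.sorted pool (fun d => d.2) false)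
            = PySem.List.sorted t0 (fun d => d.2) false := by
          have h1 := remove?_eq_popFirst _ _ _ hfind
          have h2 := sorted_remove pool v hvpool
          rw [ht0] at h2
          simp only [Option.map_some] at h2
          have h3 := h1.symm.trans h2
          exact Option.some.inj h3
        have hlen : t0.length ≤ fuel := by
          have : t0 = pool.erase v := by
            have h := PySem.List.remove?_eq_some_erase pool v hvpool
            rw [ht0] at h
            exact Option.some.inj h
          have hle := List.length_erase_of_mem hvpool
          have hpos : 0 < pool.length := List.length_pos_of_ne_nil hg.2
          simp [this, hle]
          omega
        rw [if_neg hc, hs]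
        show solLoopA fuel (k - v.2) ((PySem.List.remove? pool v).getD []) (ans + 1) = _
        rw [ht0]
        simp only [Option.getD_some]
        rw [ih (k - v.2) t0 (ans + 1) hlen]
        -- B side evaluation
        have hsf : splitFirst (fun d => decide (d.1 ≤ k))
            (PySem.List.sorted pool (fun d => d.2) false)
            = some (v, popFirst (fun d => decide (d.1 ≤ k))
                (PySem.List.sorted pool (fun d => d.2) false)) := by
          rw [splitFirst_eq, hfind]; rfl
        rw [explore_some _ _ _ hg.1 hsf]
        simp only [hpop]
        exact add_assoc ans 1 _
    · rw [if_neg hg]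
      by_cases hk : k = 0
      · rw [explore, if_pos hk]; simp
      · have hpool : pool = [] := by
          rcases not_and_or.mp hg with h | h
          · exact absurd hk (by simpa using h)
          · simpa using h
        subst hpool
        rw [explore_none k _ hk rfl]
        simp

-- ===== VERDICT (by name: the statement is the Claim_ definition above) =====
theorem solution_spec : Claim_equal_solution := by
  intro k dungeons _
  unfold Spec_solution solution solution_alt
  by_cases h : dungeons.foldl (fun acc cur => acc + cur.2) 0 ≤ k
  · simp [h]
  · simp only [h, if_false]
    simpa using loopA_eq_explore dungeons.length k dungeons 0 le_rfl
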